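-- pv_equiv track=rewrite | github.com/smartlord7/EntropicCompressor | source_code/bwt.py | rank_bwt
-- ===== SOURCE A (Python) =====
-- def rank_bwt(encoded_data):
--     tots = dict()
--     ranks = list()
--     for character in encoded_data:
--         tots.setdefault(character, 0)
--         ranks.append(tots[character])
--         tots[character] += 1
--     return ranks, tots
-- ===== SOURCE B (Python) =====
-- def rank_bwt(encoded_data):
--     ranks = [encoded_data[:i].count(c) for i, c in enumerate(encoded_data)]
--     tots = {c: encoded_data.count(c) for c in encoded_data}
--     return ranks, tots
-- ===== Notes on version B (the rewrite author's own statement) =====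
-- stated objective: simpler
-- what changed: Replaces the single stateful pass that threads a running per-character counter dict through the loop by two closed-form comprehensions: each rank is the count of the character in the prefix before it, and tots maps each character straight to its total count.
import Mathlib
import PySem

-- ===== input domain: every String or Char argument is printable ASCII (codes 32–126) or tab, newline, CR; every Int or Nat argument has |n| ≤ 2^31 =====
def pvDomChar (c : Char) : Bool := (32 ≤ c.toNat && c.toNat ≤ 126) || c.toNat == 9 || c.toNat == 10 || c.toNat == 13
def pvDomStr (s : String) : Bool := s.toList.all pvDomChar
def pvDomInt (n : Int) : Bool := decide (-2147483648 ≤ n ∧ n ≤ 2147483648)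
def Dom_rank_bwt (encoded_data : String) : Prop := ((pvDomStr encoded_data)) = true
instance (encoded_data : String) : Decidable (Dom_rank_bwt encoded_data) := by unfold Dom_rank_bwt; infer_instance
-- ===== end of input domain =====

-- B replaces A's stateful running-counter loop by two closed-form comprehensions
-- (prefix counts for ranks, total counts for tots); objective: simpler, not faster.

-- ===== PORT A =====
def rank_bwt (encoded_data : String) : List Int × (List (String × Int)) :=
  let st := encoded_data.toList.foldl
    (fun (st : PySem.Dict String Int × List Int) c =>
      let s := String.ofList [c]
      let tots := st.1.setdefault s 0
      let ranks := st.2 ++ [tots.getD s 0]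
      (tots.insert s (tots.getD s 0 + 1), ranks))
    (PySem.Dict.empty, [])
  (st.2, st.1.items)

-- ===== PORT B =====
def rank_bwt_alt (encoded_data : String) : List Int × (List (String × Int)) :=
  let ranks := (PySem.List.enumerate encoded_data.toList 0).map
    (fun q => ((PySem.Str.count (PySem.Str.slice encoded_data none (some q.1)) (String.ofList [q.2]) : Int)))
  let tots := encoded_data.toList.foldl
    (fun (d : PySem.Dict String Int) c =>
      d.insert (String.ofList [c]) ((PySem.Str.count encoded_data (String.ofList [c]) : Int)))
    PySem.Dict.empty
  (ranks, tots.items)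

-- ===== PRECONDITION & SPEC =====
def Spec_rank_bwt (encoded_data : String) (out : List Int × (List (String × Int))) : Prop := out = rank_bwt_alt encoded_data
instance (encoded_data : String) (out : List Int × (List (String × Int))) : Decidable (Spec_rank_bwt encoded_data out) := by unfold Spec_rank_bwt; infer_instance

-- ===== CLAIM (what is proved, stated in full; the proofs are below) =====
def Claim_equal_rank_bwt : Prop := ∀ (encoded_data : String), Dom_rank_bwt encoded_data → Spec_rank_bwt encoded_data (rank_bwt encoded_data)

-- ===== LEMMAS AND PROOFS =====

-- the intended value of A's ranks accumulator: rank of each char of `rest` given prefix `p`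
def ranksFrom (p rest : List Char) : List Int :=
  match rest with
  | [] => []
  | c :: cs => ((p.count c : Int)) :: ranksFrom (p ++ [c]) cs

-- the single loop step of port A
def stepA (st : PySem.Dict String Int × List Int) (c : Char) : PySem.Dict String Int × List Int :=
  let s := String.ofList [c]
  let tots := st.1.setdefault s 0
  let ranks := st.2 ++ [tots.getD s 0]
  (tots.insert s (tots.getD s 0 + 1), ranks)

theorem mkStr_injective : Function.Injective (fun c => String.ofList [c]) := by
  intro a b h
  have h2 := congrArg String.toList h
  simpa using h2

theorem count_go_single (c : Char) : ∀ (fuel : ℕ) (l : List Char) (acc : ℕ), l.length ≤ fuel →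
    PySem.Chars.count.go [c] fuel l acc = acc + l.count c := by
  intro fuel
  induction fuel with
  | zero =>
    intro l acc h
    cases l with
    | nil => simp [PySem.Chars.count.go]
    | cons hd t => simp at h
  | succ n ih =>
    intro l acc h
    cases l with
    | nil => simp [PySem.Chars.count.go]
    | cons hd t =>
      have hlen : t.length ≤ n := by simpa using Nat.lt_succ_iff.mp (by simpa using h)
      simp only [PySem.Chars.count.go]
      by_cases hc : c = hd
      · subst hc
        simp [List.isPrefixOf, ih t (acc + 1) hlen]
        omega
      · simp [List.isPrefixOf, hc, ih t acc hlen, Ne.symm hc]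

theorem chars_count_single (l : List Char) (c : Char) : PySem.Chars.count l [c] = l.count c := by
  simpa [PySem.Chars.count] using count_go_single c l.length l 0 le_rfl

theorem strCount_single (s : String) (c : Char) :
    PySem.Str.count s (String.ofList [c]) = s.toList.count c := by
  simp [PySem.Str.count_eq, chars_count_single]

theorem dict_items_ext {κ ν : Type} (a b : PySem.Dict κ ν) (h : a.items = b.items) : a = b := by
  cases a; cases b; simpa using h

theorem not_contains_forall {κ ν : Type} [BEq κ] (d : PySem.Dict κ ν) (k : κ)
    (h : d.contains k = false) : ∀ p ∈ d.items, (p.1 == k) = false := by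
  intro p hp
  have := List.any_eq_false.mp h p hp
  simpa using this

theorem insert_setdefault {κ ν : Type} [BEq κ] [LawfulBEq κ] (d : PySem.Dict κ ν) (k : κ) (v w : ν) :
    (d.setdefault k v).insert k w = d.insert k w := by
  by_cases h : d.contains k
  · simp [PySem.Dict.setdefault, h]
  · have hfalse : d.contains k = false := by simpa using h
    apply dict_items_ext
    have hc2 : (PySem.Dict.mk (d.items ++ [(k, v)]) : PySem.Dict κ ν).contains k = true := by
      simp [PySem.Dict.contains]
    rw [PySem.Dict.setdefault]
    simp only [hfalse, Bool.false_eq_true, if_false]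
    rw [PySem.Dict.items_insert, PySem.Dict.items_insert]
    simp only [hc2, hfalse, if_true, Bool.false_eq_true, if_false]
    rw [List.map_append]
    congr 1
    · have hrep : ∀ p ∈ d.items,
          (fun (p : κ × ν) => if (p.1 == k) = true then (k, w) else p) p = id p := by
        intro p hp
        simp [not_contains_forall d k hfalse p hp]
      rw [List.map_congr_left hrep, List.map_id]
    · simp

theorem getD_setdefault {κ ν : Type} [BEq κ] [LawfulBEq κ] (d : PySem.Dict κ ν) (k : κ) (v : ν)
    (hnd : d.keys.Nodup) : (d.setdefault k v).getD k v = d.getD k v := by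
  by_cases h : d.contains k
  · simp [PySem.Dict.setdefault, h]
  · have hfalse : d.contains k = false := by simpa using h
    rw [PySem.Dict.setdefault]
    simp only [hfalse, Bool.false_eq_true, if_false]
    rw [PySem.Dict.getD_of_not_contains d v hfalse]
    have hmem : (k, v) ∈ (PySem.Dict.mk (d.items ++ [(k, v)]) : PySem.Dict κ ν).items := by simp
    have hk : k ∉ d.keys := fun hkm => h ((PySem.Dict.contains_iff_mem_keys d k).mpr hkm)
    have hkeq : (PySem.Dict.mk (d.items ++ [(k, v)]) : PySem.Dict κ ν).keys = d.keys ++ [k] := by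
      show List.map (fun x => x.1) (d.items ++ [(k, v)]) = List.map (fun x => x.1) d.items ++ [k]
      simp
    have hknd : (PySem.Dict.mk (d.items ++ [(k, v)]) : PySem.Dict κ ν).keys.Nodup := by
      rw [hkeq, List.nodup_append]
      refine ⟨hnd, List.nodup_singleton _, ?_⟩
      intro a ha b hb
      rw [List.mem_singleton.mp hb]
      exact fun hab => hk (hab ▸ ha)
    exact PySem.Dict.getD_of_mem_items _ hmem hknd v

theorem foldA_inv (rest : List Char) : ∀ (p : List Char) (r : List Int),
    rest.foldl stepA (PySem.Dict.counter (p.map (fun c => String.ofList [c])), r)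
      = (PySem.Dict.counter ((p ++ rest).map (fun c => String.ofList [c])), r ++ ranksFrom p rest) := by
  induction rest with
  | nil => intro p r; simp [ranksFrom]
  | cons c cs ih =>
    intro p r
    rw [List.foldl_cons]
    have hstep : stepA (PySem.Dict.counter (p.map (fun c => String.ofList [c])), r) c
        = (PySem.Dict.counter ((p ++ [c]).map (fun c => String.ofList [c])), r ++ [(p.count c : Int)]) := by
      have hnd := PySem.Dict.nodup_keys_counter (p.map (fun c => String.ofList [c]))
      have hgd : (PySem.Dict.counter (p.map (fun c => String.ofList [c]))).getD (String.ofList [c]) 0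
          = (p.count c : Int) := by
        rw [PySem.Dict.getD_counter]
        rw [List.count_map_of_injective p _ mkStr_injective c]
      have hcnt : PySem.Dict.counter ((p ++ [c]).map (fun c => String.ofList [c]))
          = (PySem.Dict.counter (p.map (fun c => String.ofList [c]))).insert (String.ofList [c])
              ((PySem.Dict.counter (p.map (fun c => String.ofList [c]))).getD (String.ofList [c]) 0 + 1) := by
        rw [List.map_append]
        simpa [PySem.Dict.modify] using
          PySem.Dict.counter_append_singleton (p.map (fun c => String.ofList [c])) (String.ofList [c])
      simp only [stepA, getD_setdefault _ _ _ hnd, insert_setdefault, hgd, hcnt]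
    rw [hstep, ih (p ++ [c]) (r ++ [(p.count c : Int)])]
    simp [ranksFrom]

theorem ranksB_eq (rest : List Char) : ∀ (p : List Char) (s : String), s.toList = p ++ rest →
    (PySem.List.enumerate rest (p.length : Int)).map
        (fun q => ((PySem.Str.count (PySem.Str.slice s none (some q.1)) (String.ofList [q.2]) : Int)))
      = ranksFrom p rest := by
  induction rest with
  | nil => intro p s _; simp [PySem.List.enumerate, ranksFrom]
  | cons c cs ih =>
    intro p s hs
    rw [PySem.List.enumerate]
    rw [List.map_cons]
    congr 1
    · have hslice : (PySem.Str.slice s none (some (p.length : Int))).toList = p := by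
        rw [PySem.Str.toList_slice]
        have : PySem.Chars.slice s.toList none (some (p.length : Int)) = s.toList.take p.length := by
          exact PySem.List.slice_to_natCast (xs := s.toList) (b := p.length)
        rw [this, hs]
        simp
      rw [PySem.Str.count_eq, String.toList_ofList, chars_count_single, hslice]
    · have := ih (p ++ [c]) s (by simpa using hs)
      simpa [ranksFrom] using this

theorem totsB_eq (l : List Char) (g : String → Int) :
    (l.foldl (fun (d : PySem.Dict String Int) c => d.insert (String.ofList [c]) (g (String.ofList [c])))
        PySem.Dict.empty).items
      = (PySem.Set.ofList (l.map (fun c => String.ofList [c]))).map (fun k => (k, g k)) := by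
  induction l using List.reverseRecOn with
  | nil => simp [PySem.Dict.empty, PySem.Set.ofList]
  | append_singleton xs c ih =>
    rw [List.foldl_append, List.foldl_cons, List.foldl_nil]
    simp only [List.map_append, List.map_cons, List.map_nil]
    rw [PySem.Set.ofList_append_singleton]
    set d := xs.foldl (fun (d : PySem.Dict String Int) c => d.insert (String.ofList [c]) (g (String.ofList [c]))) PySem.Dict.empty with hd
    have hkeys : d.keys = (PySem.Set.ofList (xs.map (fun c => String.ofList [c])) : List String) := by
      rw [PySem.Dict.keys, ih, List.map_map]
      rw [show ((fun (x : String × Int) => x.1) ∘ fun k => (k, g k)) = id from rfl, List.map_id]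
    by_cases h : d.contains (String.ofList [c])
    · have hmem : String.ofList [c] ∈ (PySem.Set.ofList (xs.map (fun c => String.ofList [c])) : List String) := by
        rw [← hkeys]; exact (PySem.Dict.contains_iff_mem_keys d _).mp h
      have hadd : PySem.Set.add (PySem.Set.ofList (xs.map (fun c => String.ofList [c]))) (String.ofList [c])
          = PySem.Set.ofList (xs.map (fun c => String.ofList [c])) := by
        unfold PySem.Set.add PySem.Set.contains
        rw [if_pos (List.contains_iff_mem.mpr hmem)]
      rw [PySem.Dict.items_insert]
      simp only [h, if_true]
      rw [ih, hadd, List.map_map]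
      apply List.map_congr_left
      intro a _
      by_cases hac : a = String.ofList [c]
      · simp [hac]
      · simp [Function.comp, hac]
    · have hfalse : d.contains (String.ofList [c]) = false := by simpa using h
      have hnmem : String.ofList [c] ∉ (PySem.Set.ofList (xs.map (fun c => String.ofList [c])) : List String) := by
        rw [← hkeys]; exact fun hm => h ((PySem.Dict.contains_iff_mem_keys d _).mpr hm)
      have hadd : PySem.Set.add (PySem.Set.ofList (xs.map (fun c => String.ofList [c]))) (String.ofList [c])
          = (PySem.Set.ofList (xs.map (fun c => String.ofList [c])) : List String) ++ [String.ofList [c]] := by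
        unfold PySem.Set.add PySem.Set.contains
        rw [if_neg (fun hcn => hnmem (List.contains_iff_mem.mp hcn))]
      rw [PySem.Dict.items_insert]
      simp only [hfalse, Bool.false_eq_true, if_false]
      rw [ih, hadd, List.map_append]
      simp

-- ===== VERDICT (by name: the statement is the Claim_ definition above) =====
theorem rank_bwt_spec : Claim_equal_rank_bwt := by
  intro s _
  unfold Spec_rank_bwt rank_bwt rank_bwt_alt
  have hfold : s.toList.foldl stepA (PySem.Dict.empty, ([] : List Int))
      = (PySem.Dict.counter (s.toList.map (fun c => String.ofList [c])), ranksFrom [] s.toList) := by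
    simpa [PySem.Dict.counter] using foldA_inv s.toList [] []
  simp only []
  rw [show (fun (st : PySem.Dict String Int × List Int) c =>
      let s := String.ofList [c]
      let tots := st.1.setdefault s 0
      let ranks := st.2 ++ [tots.getD s 0]
      (tots.insert s (tots.getD s 0 + 1), ranks)) = stepA from rfl]
  rw [hfold]
  refine Prod.ext ?_ ?_
  · exact (ranksB_eq s.toList [] s (by simp)).symm
  · have htots := totsB_eq s.toList (fun k => (PySem.Str.count s k : Int))
    simp only at htots
    rw [PySem.Dict.items_counter, htots]
    apply List.map_congr_left
    intro k hk
    have : k ∈ s.toList.map (fun c => String.ofList [c]) := (PySem.Set.mem_ofList _ k).mp hk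
    obtain ⟨c, hc, rfl⟩ := List.mem_map.mp this
    rw [strCount_single]
    rw [List.count_map_of_injective s.toList _ mkStr_injective c]
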